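-- pv_equiv track=rewrite | github.com/VaibhavDesai/Algorithms | DynamicProgramming/abbration.py | subStringMatch
-- ===== SOURCE A (Python) =====
-- def subStringMatch(stringA, stringB):
--
--     rowN = len(stringB)
--     colN = len(stringA)
--
--     subString = [[ 0 for x in range(colN+1)] for y in range(rowN+1)]
--     for i in range(rowN+1):
--         subString[i][0] = 0
--     for i in range(colN+1):
--         subString[0][i] = 0
--
--     for i in range(1,rowN+1):
--     	for j in range(1,colN+1):
--             if(stringB[i-1].lower() == stringA[j-1].lower()):
-- 	           	subString[i][j] = subString[i-1][j-1] + 1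
--             else:
--                 subString[i][j] = max(subString[i-1][j],subString[i][j-1])
--
--     if(len(stringB) == subString[rowN][colN]):
--         return "YES"
--     else:
--         return "NO"
-- ===== SOURCE B (Python) =====
-- def subStringMatch(stringA, stringB):
--     # Two-pointer greedy scan: B is a case-insensitive subsequence of A
--     # iff LCS(A, B) == len(B).  O(n+m) instead of the O(n*m) DP table.
--     j = 0
--     n = len(stringB)
--     for ch in stringA:
--         if j < n and ch.lower() == stringB[j].lower():
--             j += 1
--     return "YES" if j == n else "NO"
-- ===== Notes on version B (the rewrite author's own statement) =====
-- stated objective: faster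
-- what changed: Replaces the O(n*m) LCS dynamic-programming table with a one-pass two-pointer greedy subsequence scan (LCS(A,B)=len(B) iff B is a case-insensitive subsequence of A).
import Mathlib
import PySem

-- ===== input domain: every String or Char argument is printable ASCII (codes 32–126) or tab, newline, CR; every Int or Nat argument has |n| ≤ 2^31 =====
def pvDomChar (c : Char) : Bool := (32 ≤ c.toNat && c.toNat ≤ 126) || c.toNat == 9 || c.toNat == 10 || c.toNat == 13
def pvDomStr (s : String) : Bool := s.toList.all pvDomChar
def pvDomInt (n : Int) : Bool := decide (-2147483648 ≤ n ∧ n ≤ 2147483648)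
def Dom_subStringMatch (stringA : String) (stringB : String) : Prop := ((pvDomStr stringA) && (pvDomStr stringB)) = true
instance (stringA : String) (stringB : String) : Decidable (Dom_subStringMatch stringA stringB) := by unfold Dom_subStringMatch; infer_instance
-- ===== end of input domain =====

-- B replaces A's O(n·m) LCS dynamic-programming table with a one-pass two-pointer
-- greedy subsequence scan; same "YES"/"NO" answer on all inputs.


-- ===== PORT A =====
-- inner loop over j (a row of the DP table): pdiag = subString[i-1][j-1],
-- p = subString[i-1][j], curLast = subString[i][j-1]
def pvRowAux (bc : Char) : List Char → List Int → Int → Int → List Int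
  | [], _, _, _ => []
  | _ :: _, [], _, _ => []
  | ac :: as, p :: ps, pdiag, curLast =>
      let c := if PySem.Chars.lowerChar bc = PySem.Chars.lowerChar ac then pdiag + 1
               else max p curLast
      c :: pvRowAux bc as ps p c

-- one iteration of the outer loop over i: builds row i from row i-1 (entry 0 stays 0)
def pvNextRow (aChars : List Char) (prev : List Int) (bc : Char) : List Int :=
  match prev with
  | [] => []
  | p0 :: ps => 0 :: pvRowAux bc aChars ps p0 0

def subStringMatch (stringA : String) (stringB : String) : String :=
  let aChars := stringA.toList
  let bChars := stringB.toList
  let colN := aChars.length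
  let rowN := bChars.length
  let row0 : List Int := List.replicate (colN + 1) 0
  let finalRow := bChars.foldl (pvNextRow aChars) row0
  if (rowN : Int) = finalRow.getD colN 0 then "YES" else "NO"

-- ===== PORT B =====
-- loop over A's chars, pointer into B kept as the remaining suffix of B
def pvSubAux : List Char → List Char → List Char
  | [], bs => bs
  | _ :: as, [] => pvSubAux as []
  | a :: as, b :: bt =>
      if PySem.Chars.lowerChar a = PySem.Chars.lowerChar b then pvSubAux as bt
      else pvSubAux as (b :: bt)

def subStringMatch_alt (stringA : String) (stringB : String) : String :=
  if (pvSubAux stringA.toList stringB.toList).isEmpty then "YES" else "NO"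

-- ===== PRECONDITION & SPEC =====
def Spec_subStringMatch (stringA : String) (stringB : String) (out : String) : Prop := out = subStringMatch_alt stringA stringB
instance (stringA : String) (stringB : String) (out : String) : Decidable (Spec_subStringMatch stringA stringB out) := by unfold Spec_subStringMatch; infer_instance

-- ===== CLAIM (what is proved, stated in full; the proofs are below) =====
def Claim_equal_subStringMatch : Prop := ∀ (stringA : String) (stringB : String), Dom_subStringMatch stringA stringB → Spec_subStringMatch stringA stringB (subStringMatch stringA stringB)

-- ===== LEMMAS AND PROOFS =====

-- case-insensitive LCS, recursing on the FRONT of both lists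
def pvLcsF : List Char → List Char → Nat
  | [], _ => 0
  | _ :: _, [] => 0
  | x :: xs, y :: ys =>
      if PySem.Chars.lowerChar x = PySem.Chars.lowerChar y then pvLcsF xs ys + 1
      else max (pvLcsF (x :: xs) ys) (pvLcsF xs (y :: ys))
  termination_by u v => u.length + v.length

theorem pvLcsF_nil_right (u : List Char) : pvLcsF u [] = 0 := by
  cases u <;> simp [pvLcsF]

-- the row the DP should hold after having consumed (in reverse) r of B:
-- entry j (j ≥ 1, a-prefix reversed = ac :: racc) is pvLcsF r (ac :: racc)
def pvSpecAux (r : List Char) (racc : List Char) : List Char → List Int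
  | [] => []
  | ac :: as => ((pvLcsF r (ac :: racc) : Int)) :: pvSpecAux r (ac :: racc) as

def pvRowOf (r a : List Char) : List Int := 0 :: pvSpecAux r [] a

theorem pvRowAux_spec (bc : Char) (r : List Char) :
    ∀ (as racc : List Char),
      pvRowAux bc as (pvSpecAux r racc as) ((pvLcsF r racc : Int)) ((pvLcsF (bc :: r) racc : Int))
        = pvSpecAux (bc :: r) racc as := by
  intro as
  induction as with
  | nil => intro racc; simp [pvSpecAux, pvRowAux]
  | cons ac as ih =>
      intro racc
      simp only [pvSpecAux, pvRowAux]
      rcases Decidable.em (PySem.Chars.lowerChar bc = PySem.Chars.lowerChar ac) with h | h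
      · rw [if_pos h]
        have hc : ((pvLcsF r racc : Int)) + 1 = ((pvLcsF (bc :: r) (ac :: racc) : Int)) := by
          rw [pvLcsF, if_pos h]; push_cast; ring
        rw [hc, ih]
      · rw [if_neg h]
        have hc : max ((pvLcsF r (ac :: racc) : Int)) ((pvLcsF (bc :: r) racc : Int))
            = ((pvLcsF (bc :: r) (ac :: racc) : Int)) := by
          rw [pvLcsF, if_neg h, Nat.cast_max, max_comm]
        rw [hc, ih]

theorem pvNextRow_rowOf (a : List Char) (r : List Char) (bc : Char) :
    pvNextRow a (pvRowOf r a) bc = pvRowOf (bc :: r) a := by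
  have h0 : ((pvLcsF r [] : Int)) = 0 := by rw [pvLcsF_nil_right]; rfl
  have h1 : ((pvLcsF (bc :: r) [] : Int)) = 0 := by rw [pvLcsF_nil_right]; rfl
  have key := pvRowAux_spec bc r a []
  rw [h0, h1] at key
  simp only [pvNextRow, pvRowOf]
  rw [key]

theorem pvLcsF_nil_left (v : List Char) : pvLcsF [] v = 0 := by
  cases v <;> simp [pvLcsF]

theorem pvSpecAux_nil (racc : List Char) :
    ∀ as : List Char, pvSpecAux [] racc as = List.replicate as.length 0 := by
  intro as
  induction as generalizing racc with
  | nil => simp [pvSpecAux]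
  | cons ac as ih => simp [pvSpecAux, pvLcsF_nil_left, List.replicate_succ, ih]

theorem pvRow0_rowOf (a : List Char) :
    List.replicate (a.length + 1) (0 : Int) = pvRowOf [] a := by
  simp [pvRowOf, pvSpecAux_nil, List.replicate_succ]

theorem pvFoldl_rowOf (a : List Char) :
    ∀ (bs r : List Char),
      bs.foldl (pvNextRow a) (pvRowOf r a) = pvRowOf (bs.reverse ++ r) a := by
  intro bs
  induction bs with
  | nil => intro r; simp
  | cons b bt ih =>
      intro r
      simp only [List.foldl_cons, pvNextRow_rowOf, ih, List.reverse_cons]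
      rw [List.append_assoc]; rfl

theorem pvSpecAux_getD (r : List Char) :
    ∀ (as racc : List Char), as ≠ [] →
      (pvSpecAux r racc as).getD (as.length - 1) 0 = ((pvLcsF r (as.reverse ++ racc) : Int)) := by
  intro as
  induction as with
  | nil => intro racc h; exact absurd rfl h
  | cons ac as ih =>
      intro racc _
      cases as with
      | nil => simp [pvSpecAux]
      | cons ac2 as2 =>
          have key := ih (ac :: racc) (by simp)
          simp only [pvSpecAux] at key
          simp only [pvSpecAux, List.length_cons]
          have hidx : as2.length + 1 + 1 - 1 = ((ac2 :: as2).length - 1) + 1 := by simp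
          rw [hidx, List.getD_cons_succ]
          simp only [List.length_cons] at key ⊢
          rw [key]
          simp

theorem pvRowOf_getD (r a : List Char) :
    (pvRowOf r a).getD a.length 0 = ((pvLcsF r a.reverse : Int)) := by
  cases a with
  | nil => simp [pvRowOf, pvSpecAux, pvLcsF_nil_right]
  | cons ac as =>
      simp only [pvRowOf, List.length_cons, List.getD_cons_succ]
      have := pvSpecAux_getD r (ac :: as) [] (by simp)
      simpa using this

theorem pvLcsF_le (u v : List Char) : pvLcsF u v ≤ u.length := by
  fun_induction pvLcsF u v with
  | case1 => simp
  | case2 => simp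
  | case3 x xs y ys h ih =>
      simp only [List.length_cons]
      omega
  | case4 x xs y ys h ih1 ih2 =>
      simp only [List.length_cons] at *
      omega

-- heads differ ⇒ a sublist of a cons skips the head
theorem pvCons_sublist_of_ne {α : Type} {a b : α} {l₁ l₂ : List α}
    (h : List.Sublist (a :: l₁) (b :: l₂)) (hne : a ≠ b) : List.Sublist (a :: l₁) l₂ := by
  cases h with
  | cons _ h' => exact h'
  | cons₂ => exact absurd rfl hne

theorem pvLcsF_eq_len_iff (u v : List Char) :
    pvLcsF u v = u.length ↔
      List.Sublist (u.map PySem.Chars.lowerChar) (v.map PySem.Chars.lowerChar) := by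
  fun_induction pvLcsF u v with
  | case1 v => simp
  | case2 x xs => simp
  | case3 x xs y ys h ih =>
      simp only [List.length_cons, Nat.add_right_cancel_iff, List.map_cons]
      rw [ih, h, List.cons_sublist_cons]
  | case4 x xs y ys h ih1 ih2 =>
      have hA := pvLcsF_le (x :: xs) ys
      have hB := pvLcsF_le xs (y :: ys)
      simp only [List.length_cons] at hA ih1 ⊢
      have hiffA : max (pvLcsF (x :: xs) ys) (pvLcsF xs (y :: ys)) = xs.length + 1 ↔
          pvLcsF (x :: xs) ys = xs.length + 1 := by omega
      rw [hiffA, ih1]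
      simp only [List.map_cons]
      constructor
      · intro hs; exact hs.cons _
      · intro hs; exact pvCons_sublist_of_ne hs h

theorem pvSubAux_nil_right : ∀ as : List Char, pvSubAux as [] = [] := by
  intro as; induction as with
  | nil => rfl
  | cons a as ih => simp [pvSubAux, ih]

theorem pvSubAux_empty_iff :
    ∀ (as bs : List Char),
      pvSubAux as bs = [] ↔
        List.Sublist (bs.map PySem.Chars.lowerChar) (as.map PySem.Chars.lowerChar) := by
  intro as
  induction as with
  | nil =>
      intro bs
      cases bs with
      | nil => simp [pvSubAux]
      | cons b bt => simp [pvSubAux]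
  | cons a at' ih =>
      intro bs
      cases bs with
      | nil => simp [pvSubAux, pvSubAux_nil_right]
      | cons b bt =>
          simp only [pvSubAux, List.map_cons]
          by_cases h : PySem.Chars.lowerChar a = PySem.Chars.lowerChar b
          · rw [if_pos h, ih bt, h, List.cons_sublist_cons]
          · rw [if_neg h, ih (b :: bt)]
            simp only [List.map_cons]
            constructor
            · intro hs; exact hs.cons _
            · intro hs; exact pvCons_sublist_of_ne hs (fun e => h e.symm)

theorem pvSublist_reverse_iff (u v : List Char) :
    List.Sublist (u.reverse.map PySem.Chars.lowerChar) (v.reverse.map PySem.Chars.lowerChar) ↔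
      (List.Sublist (u.map PySem.Chars.lowerChar) (v.map PySem.Chars.lowerChar)) := by
  rw [List.map_reverse, List.map_reverse, List.reverse_sublist]

theorem subStringMatch_spec : Claim_equal_subStringMatch := by
  intro stringA stringB _
  unfold Spec_subStringMatch subStringMatch subStringMatch_alt
  simp only []
  set a := stringA.toList with ha
  set b := stringB.toList with hb
  have hfold : b.foldl (pvNextRow a) (List.replicate (a.length + 1) 0)
      = pvRowOf (b.reverse ++ []) a := by
    rw [pvRow0_rowOf, pvFoldl_rowOf]
  have hval : (b.foldl (pvNextRow a) (List.replicate (a.length + 1) 0)).getD a.length 0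
      = ((pvLcsF b.reverse a.reverse : Int)) := by
    rw [hfold]; simp only [List.append_nil]; exact pvRowOf_getD _ _
  rw [hval]
  have hiff : ((b.length : Int) = (pvLcsF b.reverse a.reverse : Int)) ↔
      (pvSubAux a b).isEmpty = true := by
    rw [List.isEmpty_iff, pvSubAux_empty_iff]
    have h1 : ((b.length : Int) = (pvLcsF b.reverse a.reverse : Int)) ↔
        pvLcsF b.reverse a.reverse = b.reverse.length := by
      rw [List.length_reverse]
      constructor
      · intro h; exact_mod_cast h.symm
      · intro h; exact_mod_cast h.symm
    rw [h1, pvLcsF_eq_len_iff, pvSublist_reverse_iff]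
  by_cases hc : (b.length : Int) = (pvLcsF b.reverse a.reverse : Int)
  · rw [if_pos hc, if_pos (hiff.mp hc)]
  · rw [if_neg hc, if_neg (fun he => hc (hiff.mpr he))]
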